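-- pv_equiv track=rewrite | github.com/mchen644/GroverGPT-plus | dataset_generate_MMS.py | analyze_marked_state
-- ===== SOURCE A (Python) =====
-- def analyze_marked_state(params, operations):
--     mcmt_indices = [i for i, op in enumerate(operations) if op.startswith('mcmt')]
--     marked_states = []
--
--     blocks = []
--     prev_end = 0
--     for mcmt_idx in mcmt_indices:
--         start = find_block_start(operations, mcmt_idx, prev_end)
--         end = find_block_end(operations, mcmt_idx, start)
--         blocks.append((start, mcmt_idx, end))
--         prev_end = end + 1
--
--     x_ops_before_list = []
--
--     for start, mcmt_idx, end in blocks: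
--         # Extract X operations before mcmt
--         pre_mcmt_ops = operations[start: mcmt_idx]
--         x_ops_before = [op for op in pre_mcmt_ops if op.startswith('x ')]
--         x_ops_before_list.append(x_ops_before)
--
--         current_state = ''
--         block_ops = operations[start:end+1]
--
--         for q in params:
--             pre_x = any(op == f'x {q}' for op in block_ops[:block_ops.index(f'mcmt {", ".join(params)}')])
--             post_x = any(op == f'x {q}' for op in block_ops[block_ops.index(f'mcmt {", ".join(params)}')+1:])
--             bit = '0' if (pre_x and post_x) else '1'
--             current_state = bit + current_state
--
--         marked_states.append(current_state)
--     return marked_states, blocks, x_ops_before_list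
--
-- def find_block_start(ops, mcmt_idx, prev_end):
--     start = mcmt_idx
--     while start > prev_end:
--         if ops[start-1].startswith('x '):
--             start -= 1
--         else:
--             break
--     return start
--
-- def find_block_end(ops, mcmt_idx, start):
--     return mcmt_idx + (mcmt_idx - start)
-- ===== SOURCE B (Python) =====
-- def analyze_marked_state(params, operations):
--     # One forward scan over operations: tracks the current run of consecutive
--     # 'x ' ops and the previous block end, and emits each block's data (with the
--     # marked state computed by splitting at the mcmt position itself) as soon as
--     # the mcmt op is seen.
--     marked_states, blocks, x_ops_before_list = [], [], []
--     run = 0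
--     prev_end = 0
--     for i, op in enumerate(operations):
--         if op.startswith('mcmt'):
--             start = max(i - run, min(prev_end, i))
--             end = 2 * i - start
--             blocks.append((start, i, end))
--             pre = operations[start:i]
--             post = operations[i + 1:end + 1]
--             x_ops_before_list.append([o for o in pre if o.startswith('x ')])
--             state = ''
--             for q in params:
--                 state = ('0' if ('x ' + q) in pre and ('x ' + q) in post else '1') + state
--             marked_states.append(state)
--             prev_end = end + 1
--             run = 0
--         elif op.startswith('x '):
--             run += 1
--         else:
--             run = 0
--     return marked_states, blocks, x_ops_before_list
-- ===== Notes on version B (the rewrite author's own statement) =====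
-- stated objective: alternative
-- what changed: Replaced A's three traversals (enumerate-and-filter for mcmt indices, a per-mcmt backward while-scan bounded by prev_end plus a second pass over the block list that re-locates the mcmt op with list.index twice per param) by one forward scan over operations that tracks the length of the current run of 'x ' ops and the previous block end, emitting each block and its marked state (split directly at the mcmt position) as the mcmt op is encountered.
import Mathlib
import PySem

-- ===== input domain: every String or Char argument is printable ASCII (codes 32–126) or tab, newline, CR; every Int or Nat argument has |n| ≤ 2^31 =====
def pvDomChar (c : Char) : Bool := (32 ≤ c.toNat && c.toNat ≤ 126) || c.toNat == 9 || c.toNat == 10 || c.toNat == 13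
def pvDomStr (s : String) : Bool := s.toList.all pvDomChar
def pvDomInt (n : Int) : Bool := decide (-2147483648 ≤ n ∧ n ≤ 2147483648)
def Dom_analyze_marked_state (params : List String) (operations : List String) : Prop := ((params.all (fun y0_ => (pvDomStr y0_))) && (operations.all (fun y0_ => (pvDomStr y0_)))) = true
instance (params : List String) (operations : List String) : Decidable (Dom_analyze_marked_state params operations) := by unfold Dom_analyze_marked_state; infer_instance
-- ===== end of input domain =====

-- B replaces A's backward while-scan per mcmt plus a second pass over the block list by one
-- forward scan over operations that tracks the current run of consecutive 'x ' ops and emits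
-- each block (and its marked state, split at the mcmt position itself) as it is found
-- (objective: alternative decomposition, no speed claim).

-- ===== PORT A =====
-- while-loop of find_block_start; fuel (mcmt_idx - prev_end).toNat bounds the number of
-- decrements, which makes the same computation total
def find_block_start_go (ops : List String) (prev_end : Int) : Int → Nat → Int
  | start, 0 => start
  | start, fuel + 1 =>
    if start > prev_end then
      -- ops[start-1]: always in range here (prev_end ≤ start-1 < len); pyGetD is the total form
      if PySem.Str.startswith (PySem.List.pyGetD ops (start - 1) "") "x " then
        find_block_start_go ops prev_end (start - 1) fuel
      else start
    else start

def find_block_start (ops : List String) (mcmt_idx : Int) (prev_end : Int) : Int :=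
  find_block_start_go ops prev_end mcmt_idx (mcmt_idx - prev_end).toNat

def find_block_end (_ops : List String) (mcmt_idx : Int) (start : Int) : Int :=
  mcmt_idx + (mcmt_idx - start)

def analyze_marked_state (params : List String) (operations : List String) :
    List String × (List (Int × Int × Int)) × List (List String) :=
  let mcmt_indices : List Int :=
    ((PySem.List.enumerate operations).filter (fun p => PySem.Str.startswith p.2 "mcmt")).map (fun p => p.1)
  let bp : List (Int × Int × Int) × Int :=
    mcmt_indices.foldl (fun st mcmt_idx =>
      let start := find_block_start operations mcmt_idx st.2
      let e := find_block_end operations mcmt_idx start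
      (st.1 ++ [(start, mcmt_idx, e)], e + 1)) ([], 0)
  let blocks := bp.1
  let ml : List String × List (List String) :=
    blocks.foldl (fun st b =>
      let pre_mcmt_ops := PySem.List.slice operations (some b.1) (some b.2.1)
      let x_ops_before := pre_mcmt_ops.filter (fun op => PySem.Str.startswith op "x ")
      let block_ops := PySem.List.slice operations (some b.1) (some (b.2.2 + 1))
      let current_state := params.foldl (fun cs q =>
        -- block_ops.index(f'mcmt {", ".join(params)}'); none = ValueError, excluded by Pre_
        let idx : Int := (((PySem.List.index? block_ops ("mcmt " ++ PySem.Str.join ", " params)).getD 0 : Nat) : Int)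
        let pre_x := (PySem.List.slice block_ops none (some idx)).any (fun op => op == "x " ++ q)
        let post_x := (PySem.List.slice block_ops (some (idx + 1)) none).any (fun op => op == "x " ++ q)
        (if pre_x && post_x then "0" else "1") ++ cs) ""
      (st.1 ++ [current_state], st.2 ++ [x_ops_before])) ([], [])
  (ml.1, blocks, ml.2)

-- ===== PORT B =====
def analyze_marked_state_alt (params : List String) (operations : List String) :
    List String × (List (Int × Int × Int)) × List (List String) :=
  let final :=
    (PySem.List.enumerate operations).foldl
      (fun (st : List String × List (Int × Int × Int) × List (List String) × Int × Int) p =>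
        let i := p.1
        let op := p.2
        if PySem.Str.startswith op "mcmt" then
          let start := max (i - st.2.2.2.1) (min st.2.2.2.2 i)
          let e := 2 * i - start
          let pre := PySem.List.slice operations (some start) (some i)
          let post := PySem.List.slice operations (some (i + 1)) (some (e + 1))
          let state := params.foldl (fun cs q =>
            (if pre.any (fun o => o == "x " ++ q) && post.any (fun o => o == "x " ++ q)
             then "0" else "1") ++ cs) ""
          (st.1 ++ [state], st.2.1 ++ [(start, i, e)],
           st.2.2.1 ++ [pre.filter (fun o => PySem.Str.startswith o "x ")], 0, e + 1)
        else if PySem.Str.startswith op "x " then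
          (st.1, st.2.1, st.2.2.1, st.2.2.2.1 + 1, st.2.2.2.2)
        else
          (st.1, st.2.1, st.2.2.1, 0, st.2.2.2.2))
      ([], [], [], 0, 0)
  (final.1, final.2.1, final.2.2.1)

-- ===== PRECONDITION & SPEC =====
-- Pre_ excludes inputs where params is nonempty and some operation starts with 'mcmt' but is not
-- exactly the string f'mcmt {", ".join(params)}': on such inputs A's block_ops.index either raises
-- ValueError or locks onto an accidental first occurrence of that string elsewhere in the block,
-- a split point that is an artefact of A's implementation.
def Pre_analyze_marked_state (params : List String) (operations : List String) : Prop :=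
  params = [] ∨
    ∀ op ∈ operations, PySem.Str.startswith op "mcmt" = true →
      op = "mcmt " ++ PySem.Str.join ", " params

instance (params : List String) (operations : List String) :
    Decidable (Pre_analyze_marked_state params operations) := by
  unfold Pre_analyze_marked_state; infer_instance

def pvWitness_analyze_marked_state : List String × List String :=
  (["a"], ["x a", "mcmt a", "x a"])

def Spec_analyze_marked_state (params : List String) (operations : List String)
    (out : List String × (List (Int × Int × Int)) × List (List String)) : Prop :=
  out = analyze_marked_state_alt params operations

instance (params : List String) (operations : List String)
    (out : List String × (List (Int × Int × Int)) × List (List String)) :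
    Decidable (Spec_analyze_marked_state params operations out) := by
  unfold Spec_analyze_marked_state; infer_instance

-- ===== CLAIM (what is proved, stated in full; the proofs are below) =====
def Claim_equal_analyze_marked_state : Prop := ∀ (params : List String) (operations : List String), Dom_analyze_marked_state params operations → Pre_analyze_marked_state params operations → Spec_analyze_marked_state params operations (analyze_marked_state params operations)

-- ===== LEMMAS AND PROOFS =====

-- length of the maximal run of 'x '-prefixed ops ending just before position k
def pvXrun (ops : List String) : Nat → Nat
  | 0 => 0
  | k + 1 => if PySem.Str.startswith (ops.getD k "") "x " then pvXrun ops k + 1 else 0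

-- reference block list: Nat-indexed forward recursion over the suffix ops.drop k
def pvRef (ops : List String) : List String → Nat → Nat → List (Nat × Nat × Nat) × Nat
  | [], _, pe => ([], pe)
  | op :: rest, k, pe =>
    if PySem.Str.startswith op "mcmt" then
      let start := max (k - pvXrun ops k) (min pe k)
      let e := k + (k - start)
      let r := pvRef ops rest (k + 1) (e + 1)
      ((start, k, e) :: r.1, r.2)
    else pvRef ops rest (k + 1) pe

def pvCast3 (b : Nat × Nat × Nat) : Int × Int × Int := ((b.1 : Int), (b.2.1 : Int), (b.2.2 : Int))

def pvXs (ops : List String) (b : Nat × Nat × Nat) : List String :=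
  (PySem.List.slice ops (some (b.1 : Int)) (some (b.2.1 : Int))).filter
    (fun op => PySem.Str.startswith op "x ")

def pvStateB (params ops : List String) (b : Nat × Nat × Nat) : String :=
  params.foldl (fun cs q =>
    (if (PySem.List.slice ops (some (b.1 : Int)) (some (b.2.1 : Int))).any (fun o => o == "x " ++ q) &&
        (PySem.List.slice ops (some ((b.2.1 : Int) + 1)) (some ((b.2.2 : Int) + 1))).any (fun o => o == "x " ++ q)
     then "0" else "1") ++ cs) ""

def pvStateA (params ops : List String) (b : Nat × Nat × Nat) : String :=
  let block_ops := PySem.List.slice ops (some (b.1 : Int)) (some ((b.2.2 : Int) + 1))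
  params.foldl (fun cs q =>
    let idx : Int := (((PySem.List.index? block_ops ("mcmt " ++ PySem.Str.join ", " params)).getD 0 : Nat) : Int)
    let pre_x := (PySem.List.slice block_ops none (some idx)).any (fun op => op == "x " ++ q)
    let post_x := (PySem.List.slice block_ops (some (idx + 1)) none).any (fun op => op == "x " ++ q)
    (if pre_x && post_x then "0" else "1") ++ cs) ""

theorem pvXrun_le (ops : List String) (k : Nat) : pvXrun ops k ≤ k := by
  induction k with
  | zero => simp [pvXrun]
  | succ k ih => unfold pvXrun; split <;> omega

theorem pvXrun_spec (ops : List String) (k : Nat) :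
    ∀ p : Nat, k - pvXrun ops k ≤ p → p < k → PySem.Str.startswith (ops.getD p "") "x " = true := by
  induction k with
  | zero => omega
  | succ k ih =>
    intro p hp1 hp2
    unfold pvXrun at hp1
    by_cases hx : PySem.Str.startswith (ops.getD k "") "x " = true
    · rw [if_pos hx] at hp1
      rcases Nat.lt_succ_iff_lt_or_eq.mp hp2 with h | h
      · exact ih p (by have := pvXrun_le ops k; omega) h
      · exact h ▸ hx
    · rw [if_neg hx] at hp1; omega


theorem pv_not_x_of_mcmt (op : String) (h : PySem.Str.startswith op "mcmt" = true) :
    PySem.Str.startswith op "x " = false := by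
  rw [PySem.Str.startswith_eq] at h ⊢
  rw [PySem.Chars.startswith_iff] at h
  rw [Bool.eq_false_iff, Ne, PySem.Chars.startswith_iff]
  obtain ⟨t, ht⟩ := h
  rintro ⟨u, hu⟩
  rw [← ht] at hu
  simp [show "mcmt".toList = ['m','c','m','t'] from rfl, show "x ".toList = ['x',' '] from rfl] at hu


theorem pv_fbs_eq (ops : List String) (k : Nat) (pe : Int) (hpe : 0 ≤ pe) (fuel : Nat)
    (hf : (k : Int) - pe ≤ fuel) :
    find_block_start_go ops pe (k : Int) fuel =
      max ((k : Int) - pvXrun ops k) (min pe (k : Int)) := by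
  induction k generalizing fuel with
  | zero =>
    have h0 : ¬ ((0 : Int) > pe) := by omega
    cases fuel <;> simp [find_block_start_go, h0, pvXrun]
  | succ k ih =>
    by_cases hgt : ((k + 1 : Nat) : Int) > pe
    · obtain ⟨f, rfl⟩ : ∃ f, fuel = f + 1 := ⟨fuel - 1, by omega⟩
      rw [show ((k + 1 : Nat) : Int) = (k : Int) + 1 by push_cast; ring] at hgt ⊢
      unfold find_block_start_go
      rw [if_pos hgt]
      have hidx : (k : Int) + 1 - 1 = (k : Int) := by ring
      rw [hidx, PySem.List.pyGetD_natCast]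
      by_cases hx : PySem.Str.startswith (ops.getD k "") "x " = true
      · have hxr : pvXrun ops (k + 1) = pvXrun ops k + 1 := by
          simp only [pvXrun]; rw [if_pos hx]
        rw [if_pos hx, ih f (by omega), hxr]
        push_cast
        have := pvXrun_le ops k
        omega
      · have hxr : pvXrun ops (k + 1) = 0 := by
          simp only [pvXrun]; rw [if_neg hx]
        rw [if_neg hx, hxr]
        push_cast
        omega
    · have := pvXrun_le ops (k + 1)
      cases fuel <;>
        · unfold find_block_start_go
          simp only [gt_iff_lt, not_lt] at hgt
          push_cast at hgt ⊢
          omega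


-- A's first fold over the mcmt indices equals the reference recursion
theorem pv_A_blocks (ops : List String) (suffix : List String) (k : Nat) (pe : Nat)
    (acc : List (Int × Int × Int)) (hs : suffix = ops.drop k) :
    (((PySem.List.enumerate suffix (k : Int)).filter (fun p => PySem.Str.startswith p.2 "mcmt")).map
        (fun p => p.1)).foldl
      (fun st mcmt_idx =>
        (st.1 ++ [(find_block_start ops mcmt_idx st.2, mcmt_idx,
            find_block_end ops mcmt_idx (find_block_start ops mcmt_idx st.2))],
          find_block_end ops mcmt_idx (find_block_start ops mcmt_idx st.2) + 1))
      (acc, (pe : Int)) =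
    (acc ++ ((pvRef ops suffix k pe).1.map pvCast3), ((pvRef ops suffix k pe).2 : Int)) := by
  induction suffix generalizing k pe acc with
  | nil => simp [pvRef, PySem.List.enumerate]
  | cons op rest ih =>
    have hs' : rest = ops.drop (k + 1) := by
      have h1 : (op :: rest).drop 1 = (ops.drop k).drop 1 := by rw [hs]
      rw [List.drop_drop] at h1
      simpa using h1
    have henum : PySem.List.enumerate (op :: rest) (k : Int) =
        ((k : Int), op) :: PySem.List.enumerate rest (((k + 1 : Nat)) : Int) := by
      rw [show ((k + 1 : Nat) : Int) = (k : Int) + 1 by push_cast; ring]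
      rfl
    rw [henum]
    by_cases hM : PySem.Str.startswith op "mcmt" = true
    · have hle := pvXrun_le ops k
      have hfbs : find_block_start ops (k : Int) (pe : Int) =
          ((max (k - pvXrun ops k) (min pe k) : Nat) : Int) := by
        unfold find_block_start
        rw [pv_fbs_eq ops k pe (by omega) _ (by omega)]
        push_cast
        omega
      have hfbe : find_block_end ops (k : Int) ((max (k - pvXrun ops k) (min pe k) : Nat) : Int) =
          ((k + (k - max (k - pvXrun ops k) (min pe k)) : Nat) : Int) := by
        unfold find_block_end
        push_cast
        omega
      simp only [List.filter_cons, hM, if_true, List.map_cons, List.foldl_cons]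
      rw [hfbs, hfbe,
        show ((k + (k - max (k - pvXrun ops k) (min pe k)) : Nat) : Int) + 1 =
          ((k + (k - max (k - pvXrun ops k) (min pe k)) + 1 : Nat) : Int) by push_cast; ring,
        ih (k + 1) (k + (k - max (k - pvXrun ops k) (min pe k)) + 1) _ hs']
      simp only [pvRef, hM, if_true, List.map_cons, pvCast3, List.append_assoc,
        List.cons_append, List.nil_append]
    · simp only [List.filter_cons, hM, Bool.false_eq_true, if_false]
      rw [ih (k + 1) pe acc hs']
      simp only [pvRef, hM, Bool.false_eq_true, if_false]

-- B's single forward fold equals the reference recursion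
theorem pv_B_fold (params ops : List String) (suffix : List String) (k : Nat) (pe : Nat)
    (ms : List String) (bl : List (Int × Int × Int)) (xl : List (List String))
    (hs : suffix = ops.drop k) :
    (PySem.List.enumerate suffix (k : Int)).foldl
      (fun (st : List String × List (Int × Int × Int) × List (List String) × Int × Int) p =>
        if PySem.Str.startswith p.2 "mcmt" then
          (st.1 ++ [params.foldl (fun cs q =>
              (if (PySem.List.slice ops (some (max (p.1 - st.2.2.2.1) (min st.2.2.2.2 p.1))) (some p.1)).any (fun o => o == "x " ++ q) &&
                  (PySem.List.slice ops (some (p.1 + 1)) (some (2 * p.1 - max (p.1 - st.2.2.2.1) (min st.2.2.2.2 p.1) + 1))).any (fun o => o == "x " ++ q)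
               then "0" else "1") ++ cs) ""],
            st.2.1 ++ [(max (p.1 - st.2.2.2.1) (min st.2.2.2.2 p.1), p.1,
              2 * p.1 - max (p.1 - st.2.2.2.1) (min st.2.2.2.2 p.1))],
            st.2.2.1 ++ [(PySem.List.slice ops (some (max (p.1 - st.2.2.2.1) (min st.2.2.2.2 p.1))) (some p.1)).filter
              (fun o => PySem.Str.startswith o "x ")],
            0, 2 * p.1 - max (p.1 - st.2.2.2.1) (min st.2.2.2.2 p.1) + 1)
        else if PySem.Str.startswith p.2 "x " then
          (st.1, st.2.1, st.2.2.1, st.2.2.2.1 + 1, st.2.2.2.2)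
        else
          (st.1, st.2.1, st.2.2.1, 0, st.2.2.2.2))
      (ms, bl, xl, ((pvXrun ops k : Nat) : Int), (pe : Int)) =
    (ms ++ (pvRef ops suffix k pe).1.map (pvStateB params ops),
      bl ++ (pvRef ops suffix k pe).1.map pvCast3,
      xl ++ (pvRef ops suffix k pe).1.map (pvXs ops),
      ((pvXrun ops (k + suffix.length) : Nat) : Int), ((pvRef ops suffix k pe).2 : Int)) := by
  induction suffix generalizing k pe ms bl xl with
  | nil => simp [pvRef, PySem.List.enumerate]
  | cons op rest ih =>
    have hs' : rest = ops.drop (k + 1) := by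
      have h1 : (op :: rest).drop 1 = (ops.drop k).drop 1 := by rw [hs]
      rw [List.drop_drop] at h1
      simpa using h1
    have hop : ops.getD k "" = op := by
      have h0 : (ops.drop k)[0]? = some op := by rw [← hs]; rfl
      simp only [List.getElem?_drop, Nat.add_zero] at h0
      rw [List.getD_eq_getElem?_getD, h0]; rfl
    have henum : PySem.List.enumerate (op :: rest) (k : Int) =
        ((k : Int), op) :: PySem.List.enumerate rest (((k + 1 : Nat)) : Int) := by
      rw [show ((k + 1 : Nat) : Int) = (k : Int) + 1 by push_cast; ring]
      rfl
    have hlen : k + (op :: rest).length = (k + 1) + rest.length := by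
      simp only [List.length_cons]; omega
    rw [henum, List.foldl_cons, hlen]
    by_cases hM : PySem.Str.startswith op "mcmt" = true
    · have hle := pvXrun_le ops k
      have hnx : PySem.Str.startswith op "x " = false := pv_not_x_of_mcmt op hM
      have hxr1 : pvXrun ops (k + 1) = 0 := by
        simp only [pvXrun]
        rw [hop, hnx]
        simp
      dsimp only
      rw [if_pos hM]
      rw [show max ((k : Int) - ((pvXrun ops k : Nat) : Int)) (min (pe : Int) (k : Int)) =
          ((max (k - pvXrun ops k) (min pe k) : Nat) : Int) by push_cast; omega]
      rw [show 2 * (k : Int) - ((max (k - pvXrun ops k) (min pe k) : Nat) : Int) =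
          ((k + (k - max (k - pvXrun ops k) (min pe k)) : Nat) : Int) by push_cast; omega]
      rw [show ((k + (k - max (k - pvXrun ops k) (min pe k)) : Nat) : Int) + 1 =
          ((k + (k - max (k - pvXrun ops k) (min pe k)) + 1 : Nat) : Int) by push_cast; ring]
      have ih' := ih (k + 1) (k + (k - max (k - pvXrun ops k) (min pe k)) + 1)
      simp only [hxr1, Nat.cast_zero] at ih'
      rw [ih' _ _ _ hs']
      simp only [pvRef, hM, if_true, List.map_cons, List.append_assoc, List.cons_append,
        List.nil_append, pvStateB, pvXs, pvCast3]
      norm_cast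
    · rw [if_neg hM]
      by_cases hX : PySem.Str.startswith op "x " = true
      · have hxr : pvXrun ops (k + 1) = pvXrun ops k + 1 := by
          simp only [pvXrun]
          rw [hop, if_pos hX]
        dsimp only
        rw [if_pos hX,
          show ((pvXrun ops k : Nat) : Int) + 1 = ((pvXrun ops k + 1 : Nat) : Int) by push_cast; ring,
          ← hxr, ih (k + 1) pe _ _ _ hs']
        simp only [pvRef, hM, Bool.false_eq_true, if_false]
      · have hxr0 : pvXrun ops (k + 1) = 0 := by
          simp only [pvXrun]
          rw [hop, if_neg hX]
        dsimp only
        rw [if_neg hX]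
        have ih' := ih (k + 1) pe
        simp only [hxr0, Nat.cast_zero] at ih'
        rw [ih' _ _ _ hs']
        simp only [pvRef, hM, Bool.false_eq_true, if_false]

-- facts carried by every reference block
theorem pv_ref_facts (ops : List String) (suffix : List String) (k : Nat) (pe : Nat)
    (hs : suffix = ops.drop k)
    (b : Nat × Nat × Nat) (hb : b ∈ (pvRef ops suffix k pe).1) :
    b.1 ≤ b.2.1 ∧ b.2.1 < ops.length ∧ b.2.2 = b.2.1 + (b.2.1 - b.1) ∧ b.2.1 ≤ b.2.2 ∧
      PySem.Str.startswith (ops.getD b.2.1 "") "mcmt" = true ∧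
      (∀ p : Nat, b.1 ≤ p → p < b.2.1 → PySem.Str.startswith (ops.getD p "") "mcmt" = false) := by
  induction suffix generalizing k pe with
  | nil => simp [pvRef] at hb
  | cons op rest ih =>
    have hk : k < ops.length := by
      by_contra hc
      have : ops.drop k = [] := List.drop_eq_nil_of_le (by omega)
      rw [this] at hs; simp at hs
    have hop : ops.getD k "" = op := by
      have h0 : (ops.drop k)[0]? = some op := by rw [← hs]; rfl
      simp only [List.getElem?_drop, Nat.add_zero] at h0
      rw [List.getD_eq_getElem?_getD, h0]; rfl
    have hs' : rest = ops.drop (k + 1) := by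
      have h1 : (op :: rest).drop 1 = (ops.drop k).drop 1 := by rw [hs]
      rw [List.drop_drop] at h1
      simpa using h1
    by_cases hM : PySem.Str.startswith op "mcmt" = true
    · simp only [pvRef, hM, if_true] at hb
      rcases List.mem_cons.mp hb with hb | hb
      · subst hb
        refine ⟨by dsimp only; omega, hk, rfl, by dsimp only; omega, by rw [hop]; exact hM, ?_⟩
        intro p hp1 hp2
        simp only at hp1 hp2
        have hx := pvXrun_spec ops k p (by omega) hp2
        by_cases hM2 : PySem.Str.startswith (ops.getD p "") "mcmt" = true
        · rw [pv_not_x_of_mcmt _ hM2] at hx; exact absurd hx (by simp)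
        · simpa using hM2
      · exact ih _ _ hs' hb
    · simp only [pvRef, hM, Bool.false_eq_true, if_false] at hb
      exact ih _ _ hs' hb

theorem pv_target_mcmt (params : List String) :
    PySem.Str.startswith ("mcmt " ++ PySem.Str.join ", " params) "mcmt" = true := by
  rw [PySem.Str.startswith_eq, PySem.Chars.startswith_iff, String.toList_append]
  exact ⟨' ' :: (PySem.Str.join ", " params).toList, rfl⟩

theorem pv_states_eq (params ops : List String)
    (hpre : ∀ op ∈ ops, PySem.Str.startswith op "mcmt" = true →
      op = "mcmt " ++ PySem.Str.join ", " params)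
    (b : Nat × Nat × Nat)
    (h1 : b.1 ≤ b.2.1) (h2 : b.2.1 < ops.length) (h3 : b.2.2 = b.2.1 + (b.2.1 - b.1))
    (h5 : PySem.Str.startswith (ops.getD b.2.1 "") "mcmt" = true)
    (h6 : ∀ p : Nat, b.1 ≤ p → p < b.2.1 → PySem.Str.startswith (ops.getD p "") "mcmt" = false) :
    pvStateA params ops b = pvStateB params ops b := by
  obtain ⟨s, k, e⟩ := b
  dsimp only at h1 h2 h3 h5 h6
  unfold pvStateA pvStateB
  dsimp only
  have hbo : PySem.List.slice ops (some (s : Int)) (some ((e : Int) + 1)) =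
      List.take (e + 1 - s) (List.drop s ops) := by
    rw [show ((e : Int) + 1) = ((e + 1 : Nat) : Int) by push_cast; ring, PySem.List.slice_natCast]
  have hlen : (List.take (e + 1 - s) (List.drop s ops)).length = min (e + 1 - s) (ops.length - s) := by
    simp
  have hks : k - s < (List.take (e + 1 - s) (List.drop s ops)).length := by
    rw [hlen]; omega
  have helem : ∀ j, (hj : j < (List.take (e + 1 - s) (List.drop s ops)).length) →
      (List.take (e + 1 - s) (List.drop s ops))[j] = ops.getD (s + j) "" := by
    intro j hj
    rw [hlen] at hj
    rw [List.getElem_take, List.getElem_drop, List.getD_eq_getElem ops "" (by omega)]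
  have hkval : ops.getD k "" = "mcmt " ++ PySem.Str.join ", " params := by
    rw [List.getD_eq_getElem ops "" h2] at h5 ⊢
    exact hpre _ (List.getElem_mem h2) h5
  have hidx : PySem.List.index? (List.take (e + 1 - s) (List.drop s ops))
      ("mcmt " ++ PySem.Str.join ", " params) = some (k - s) := by
    show List.idxOf? _ _ = _
    rw [List.idxOf?_eq_some_iff]
    refine ⟨hks, ?_, ?_⟩
    · rw [helem _ hks, show s + (k - s) = k by omega, hkval]
    · intro j hj
      have hj' : j < (List.take (e + 1 - s) (List.drop s ops)).length := by omega
      rw [helem _ hj']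
      intro hc
      have : PySem.Str.startswith (ops.getD (s + j) "") "mcmt" = true := by
        rw [hc]; exact pv_target_mcmt params
      rw [h6 (s + j) (by omega) (by omega)] at this
      exact absurd this (by simp)
  have hpre_eq : PySem.List.slice (List.take (e + 1 - s) (List.drop s ops)) none
        (some (((k - s : Nat) : Nat) : Int)) =
      PySem.List.slice ops (some (s : Int)) (some (k : Int)) := by
    rw [PySem.List.slice_to_natCast, PySem.List.slice_natCast, List.take_take]
    congr 1
    omega
  have hpost_eq : PySem.List.slice (List.take (e + 1 - s) (List.drop s ops))
        (some (((k - s : Nat) : Int) + 1)) none =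
      PySem.List.slice ops (some ((k : Int) + 1)) (some ((e : Int) + 1)) := by
    rw [show ((k - s : Nat) : Int) + 1 = ((k - s + 1 : Nat) : Int) by push_cast; ring,
      show ((k : Int) + 1) = ((k + 1 : Nat) : Int) by push_cast; ring,
      show ((e : Int) + 1) = ((e + 1 : Nat) : Int) by push_cast; ring,
      PySem.List.slice_from_natCast, PySem.List.slice_natCast, List.drop_take, List.drop_drop]
    congr 1
    · omega
    · congr 1; omega
  rw [hbo]
  apply PySem.List.foldl_congr_mem
  intro cs q _
  simp only [hidx, Option.getD_some, hpre_eq, hpost_eq]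

theorem pv_A_char (params ops : List String) :
    analyze_marked_state params ops =
      ((pvRef ops ops 0 0).1.map (pvStateA params ops),
        (pvRef ops ops 0 0).1.map pvCast3,
        (pvRef ops ops 0 0).1.map (pvXs ops)) := by
  have hA := pv_A_blocks ops ops 0 0 [] rfl
  simp only [Nat.cast_zero] at hA
  unfold analyze_marked_state
  dsimp only
  rw [hA]
  dsimp only
  rw [PySem.List.foldl_prod_mk
      (f := fun (a : List String) (b : Int × Int × Int) =>
        a ++ [params.foldl (fun cs q =>
          (if ((PySem.List.slice (PySem.List.slice ops (some b.1) (some (b.2.2 + 1))) none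
                  (some (((PySem.List.index? (PySem.List.slice ops (some b.1) (some (b.2.2 + 1)))
                    ("mcmt " ++ PySem.Str.join ", " params)).getD 0 : Nat) : Int))).any
                  (fun op => op == "x " ++ q) &&
                (PySem.List.slice (PySem.List.slice ops (some b.1) (some (b.2.2 + 1)))
                  (some ((((PySem.List.index? (PySem.List.slice ops (some b.1) (some (b.2.2 + 1)))
                    ("mcmt " ++ PySem.Str.join ", " params)).getD 0 : Nat) : Int) + 1)) none).any
                  (fun op => op == "x " ++ q))
           then "0" else "1") ++ cs) ""])
      (g := fun (a : List (List String)) (b : Int × Int × Int) =>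
        a ++ [(PySem.List.slice ops (some b.1) (some b.2.1)).filter
          (fun op => PySem.Str.startswith op "x ")])]
  rw [PySem.List.foldl_append_singleton_eq_map, PySem.List.foldl_append_singleton_eq_map]
  simp only [List.nil_append, List.map_map]
  refine Prod.ext ?_ (Prod.ext rfl ?_)
  · apply List.map_congr_left
    intro b _
    simp only [Function.comp_apply, pvStateA, pvCast3]
    rfl
  · apply List.map_congr_left
    intro b _
    simp only [Function.comp_apply, pvXs, pvCast3]

theorem pv_B_char (params ops : List String) :
    analyze_marked_state_alt params ops =
      ((pvRef ops ops 0 0).1.map (pvStateB params ops),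
        (pvRef ops ops 0 0).1.map pvCast3,
        (pvRef ops ops 0 0).1.map (pvXs ops)) := by
  have hB := pv_B_fold params ops ops 0 0 [] [] [] rfl
  rw [show ((pvXrun ops 0 : Nat) : Int) = 0 from rfl] at hB
  simp only [Nat.cast_zero] at hB
  unfold analyze_marked_state_alt
  dsimp only
  rw [hB]
  dsimp only
  simp only [List.nil_append]

-- ===== VERDICT (by name: the statement is the Claim_ definition above) =====
theorem analyze_marked_state_spec : Claim_equal_analyze_marked_state := by
  intro params ops _ hpre
  unfold Spec_analyze_marked_state
  rw [pv_A_char, pv_B_char]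
  rcases hpre with h | h
  · subst h
    simp [pvStateA, pvStateB]
  · refine congrArg (fun l => (l, (pvRef ops ops 0 0).1.map pvCast3, (pvRef ops ops 0 0).1.map (pvXs ops))) ?_
    apply List.map_congr_left
    intro b hb
    obtain ⟨h1, h2, h3, _, h5, h6⟩ := pv_ref_facts ops ops 0 0 rfl b hb
    exact pv_states_eq params ops h b h1 h2 h3 h5 h6
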